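-- pv_equiv track=rewrite | github.com/Pranshu3510/Lead-Scraper-Agent | utils.py | rotate_search_params
-- ===== SOURCE A (Python) =====
-- def rotate_search_params(
--     industries: list[str],
--     locations: list[str],
--     iteration: int,
-- ) -> tuple[str, str]:
--     """
--     Cycle through all industry × location combinations.
--     Each iteration picks a different combo to avoid repeating the same search.
--     """
--     combos = [(ind, loc) for ind in industries for loc in locations]
--     idx = iteration % len(combos)
--     return combos[idx]
-- ===== SOURCE B (Python) =====
-- def rotate_search_params(
--     industries: list[str],
--     locations: list[str],
--     iteration: int,
-- ) -> tuple[str, str]: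
--     """O(1) arithmetic index decomposition instead of materializing all combos."""
--     n_loc = len(locations)
--     i = iteration % (len(industries) * n_loc)
--     return (industries[i // n_loc], locations[i % n_loc])
-- ===== Notes on version B (the rewrite author's own statement) =====
-- stated objective: faster
-- what changed: Replaces building the full industries x locations product list with an O(1) arithmetic decomposition of the cyclic index (i // len(locations), i % len(locations)).
import Mathlib
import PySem

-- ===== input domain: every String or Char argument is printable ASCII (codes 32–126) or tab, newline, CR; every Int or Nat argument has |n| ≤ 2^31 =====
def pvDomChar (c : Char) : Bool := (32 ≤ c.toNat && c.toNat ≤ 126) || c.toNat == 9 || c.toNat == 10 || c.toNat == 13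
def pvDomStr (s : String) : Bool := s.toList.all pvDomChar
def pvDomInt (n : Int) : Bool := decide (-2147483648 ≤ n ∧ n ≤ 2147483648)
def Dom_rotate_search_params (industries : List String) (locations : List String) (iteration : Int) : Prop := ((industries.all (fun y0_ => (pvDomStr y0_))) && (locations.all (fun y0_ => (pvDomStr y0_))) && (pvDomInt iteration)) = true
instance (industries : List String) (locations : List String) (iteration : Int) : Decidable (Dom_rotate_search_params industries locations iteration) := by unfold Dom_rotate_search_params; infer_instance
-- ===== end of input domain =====

-- B replaces the materialized industries×locations product list with an O(1)
-- arithmetic decomposition of the cyclic index (return value only; no side effects).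

-- ===== PORT A =====
def rotate_search_params (industries : List String) (locations : List String) (iteration : Int) : String × String :=
  let combos := industries.flatMap (fun ind => locations.map (fun loc => (ind, loc)))
  let idx := PySem.Int.mod iteration (combos.length : Int)
  PySem.List.pyGetD combos idx ("", "")   -- guarded read; in range under Pre_

-- ===== PORT B =====
def rotate_search_params_alt (industries : List String) (locations : List String) (iteration : Int) : String × String :=
  let nLoc : Int := (locations.length : Int)
  let i := PySem.Int.mod iteration ((industries.length : Int) * nLoc)
  (PySem.List.pyGetD industries (PySem.Int.floordiv i nLoc) "",
   PySem.List.pyGetD locations (PySem.Int.mod i nLoc) "")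

-- ===== PRECONDITION & SPEC =====
-- Pre_ excludes exactly the inputs where Python A raises ZeroDivisionError (empty combo list).
def Pre_rotate_search_params (industries : List String) (locations : List String) (iteration : Int) : Prop :=
  industries ≠ [] ∧ locations ≠ []
instance (industries : List String) (locations : List String) (iteration : Int) : Decidable (Pre_rotate_search_params industries locations iteration) := by unfold Pre_rotate_search_params; infer_instance
def pvWitness_rotate_search_params : List String × List String × Int := (["tech", "health"], ["NY", "LA", "SF"], 7)

def Spec_rotate_search_params (industries : List String) (locations : List String) (iteration : Int) (out : String × String) : Prop := out = rotate_search_params_alt industries locations iteration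
instance (industries : List String) (locations : List String) (iteration : Int) (out : String × String) : Decidable (Spec_rotate_search_params industries locations iteration out) := by unfold Spec_rotate_search_params; infer_instance

-- ===== CLAIM (what is proved, stated in full; the proofs are below) =====
def Claim_equal_rotate_search_params : Prop := ∀ (industries : List String) (locations : List String) (iteration : Int), Dom_rotate_search_params industries locations iteration → Pre_rotate_search_params industries locations iteration → Spec_rotate_search_params industries locations iteration (rotate_search_params industries locations iteration)

-- ===== LEMMAS AND PROOFS =====

lemma combos_length (inds locs : List String) :
    (inds.flatMap (fun ind => locs.map (fun loc => (ind, loc)))).length = inds.length * locs.length := by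
  induction inds with
  | nil => simp
  | cons x rest ih => simp [List.flatMap_cons, ih, Nat.succ_mul, Nat.add_comm]

lemma combos_getD (inds locs : List String) (n : Nat) (hn : n < inds.length * locs.length) :
    (inds.flatMap (fun ind => locs.map (fun loc => (ind, loc)))).getD n ("", "") =
      (inds.getD (n / locs.length) "", locs.getD (n % locs.length) "") := by
  induction inds generalizing n with
  | nil => simp at hn
  | cons x rest ih =>
    have hL : 0 < locs.length := by
      rcases Nat.eq_zero_or_pos locs.length with h | h
      · simp [h] at hn
      · exact h
    simp only [List.flatMap_cons]
    by_cases hlt : n < locs.length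
    · rw [List.getD_eq_getElem?_getD, List.getElem?_append_left (by simpa using hlt)]
      simp [List.getElem?_map, Nat.div_eq_of_lt hlt, Nat.mod_eq_of_lt hlt,
            List.getD_eq_getElem?_getD, (List.getElem?_eq_getElem (by simpa using hlt) : locs[n]? = _)]
    · rw [Nat.not_lt] at hlt
      rw [List.getD_eq_getElem?_getD, List.getElem?_append_right (by simpa using hlt)]
      have hn' : n - locs.length < rest.length * locs.length := by
        have : n < locs.length + rest.length * locs.length := by
          simpa [List.length_cons, Nat.succ_mul, Nat.add_comm] using hn
        omega
      have := ih (n - locs.length) hn'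
      rw [List.getD_eq_getElem?_getD] at this
      simp only [List.length_map] at *
      rw [this]
      have hdiv : n / locs.length = (n - locs.length) / locs.length + 1 :=
        Nat.div_eq_sub_div hL hlt
      have hmod : n % locs.length = (n - locs.length) % locs.length :=
        (Nat.mod_eq_sub_mod hlt).symm ▸ rfl
      rw [hdiv, Nat.mod_eq_sub_mod hlt]
      simp

theorem rotate_search_params_spec : Claim_equal_rotate_search_params := by
  intro inds locs it _ hpre
  obtain ⟨h1, h2⟩ := hpre
  have hI : 0 < inds.length := List.length_pos_iff.mpr h1
  have hL : 0 < locs.length := List.length_pos_iff.mpr h2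
  have hIL : (0 : Int) < (inds.length : Int) * (locs.length : Int) := by positivity
  unfold Spec_rotate_search_params rotate_search_params rotate_search_params_alt
  simp only [combos_length]
  -- both sides use the same Python mod; rewrite it as a Nat cast
  set m := PySem.Int.mod it ((inds.length : Int) * (locs.length : Int)) with hm
  have hcast : ((inds.length : Int) * (locs.length : Int)) = ((inds.length * locs.length : Nat) : Int) := by
    push_cast; ring
  have hm0 : 0 ≤ m := PySem.Int.mod_nonneg it hIL
  have hmlt : m < (inds.length : Int) * (locs.length : Int) := PySem.Int.mod_lt it hIL
  set n := m.toNat with hn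
  have hmn : m = (n : Int) := (Int.toNat_of_nonneg hm0).symm
  have hnlt : n < inds.length * locs.length := by
    have := hmlt
    rw [hmn] at this
    exact_mod_cast this
  rw [← hcast, ← hm, hmn]
  rw [PySem.Int.floordiv_natCast n locs.length, PySem.Int.mod_natCast n locs.length]
  rw [PySem.List.pyGetD_natCast, PySem.List.pyGetD_natCast, PySem.List.pyGetD_natCast]
  exact combos_getD inds locs n hnlt
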